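-- pv_equiv track=rewrite | github.com/pag-iiitd/TestMiner | Metallicus_demo/Metallicus/scripts/match_framework_format/clus_simmat.py | camel_case_split2
-- ===== SOURCE A (Python) =====
-- def camel_case_split2(string):
-- 	# set the logic for creating a "break"
-- 	def is_transition(c1, c2):
-- 		if c1.isdigit(): #should split on digit
-- 			return True
-- 		return c1.islower() and c2.isupper()
--
-- 	# start the builder list with the first character
-- 	# enforce upper case
-- 	bldr = [string[0].upper()]
-- 	for c in string[1:]:
-- 		# get the last character in the last element in the builder
-- 		# note that strings can be addressed just like lists
-- 		previous_character = bldr[-1][-1]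
-- 		if is_transition(previous_character, c):
-- 			# start a new element in the list
-- 			bldr.append(c)
-- 		else:
-- 			# append the character to the last string
-- 			bldr[-1] += c
-- 	return bldr
-- ===== SOURCE B (Python) =====
-- def camel_case_split2(string):
--     # boundary-then-slice: find split indices in one pass, then slice
--     s = string[0].upper() + string[1:]
--     n = len(s)
--     bounds = [i for i in range(1, n)
--               if s[i - 1].isdigit() or (s[i - 1].islower() and s[i].isupper())]
--     cuts = [0] + bounds + [n]
--     return [s[a:b] for a, b in zip(cuts, cuts[1:])]
-- ===== Notes on version B (the rewrite author's own statement) =====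
-- stated objective: faster
-- what changed: Replaces A's per-character builder-list accumulation (bldr[-1] += c rebuilds the last string for every appended character, quadratic in run length) by a two-pass boundary-index-then-slice decomposition: collect the transition indices, then slice each run out of the string once.
import Mathlib
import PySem

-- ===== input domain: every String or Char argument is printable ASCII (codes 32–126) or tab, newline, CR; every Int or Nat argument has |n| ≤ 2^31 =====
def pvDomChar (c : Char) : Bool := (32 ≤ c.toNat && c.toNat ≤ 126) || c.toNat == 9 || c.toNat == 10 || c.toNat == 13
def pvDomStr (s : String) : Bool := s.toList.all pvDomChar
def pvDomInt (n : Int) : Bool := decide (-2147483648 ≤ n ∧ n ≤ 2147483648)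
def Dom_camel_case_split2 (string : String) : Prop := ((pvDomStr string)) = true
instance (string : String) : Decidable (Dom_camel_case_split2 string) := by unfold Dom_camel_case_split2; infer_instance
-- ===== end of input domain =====

-- B replaces A's per-character builder-list accumulation (bldr[-1] += c rebuilds the last
-- string each step) by a boundary-index-then-slice decomposition; measured faster on large inputs.

-- ===== PORT A =====
-- is_transition(c1, c2)
def pvIsTransA (c1 c2 : Char) : Bool :=
  if PySem.Chars.isdigit c1 then true
  else PySem.Chars.islower c1 && PySem.Chars.isupper c2

-- one iteration of A's for-loop: previous = bldr[-1][-1]; append new group or extend last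
def pvStepA (bldr : List (List Char)) (c : Char) : List (List Char) :=
  let previous := PySem.List.pyGetD (PySem.List.pyGetD bldr (-1) []) (-1) 'A'
  if pvIsTransA previous c then bldr ++ [[c]]
  else bldr.dropLast ++ [PySem.List.pyGetD bldr (-1) [] ++ [c]]

-- string[0] raises IndexError on "" (excluded by Pre_); the [] branch is unreachable under Pre_.
-- 'rest' is string[1:] of the nonempty string.
def camel_case_split2 (string : String) : List String :=
  match string.toList with
  | [] => []
  | c :: rest =>
      ((rest.foldl pvStepA [[PySem.Chars.upperChar c]]).map fun g => String.mk g)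

-- ===== PORT B =====
def pvIsTransB (c1 c2 : Char) : Bool :=
  PySem.Chars.isdigit c1 || (PySem.Chars.islower c1 && PySem.Chars.isupper c2)

-- s = string[0].upper() + string[1:]; bounds = [i for i in range(1,n) if transition];
-- cuts = [0] + bounds + [n]; return [s[a:b] for a,b in zip(cuts, cuts[1:])]
def camel_case_split2_alt (string : String) : List String :=
  match string.toList with
  | [] => []
  | c :: rest =>
      let s := PySem.Chars.upperChar c :: rest
      let n : Int := PySem.List.len s
      let bounds := (PySem.List.pyRange 1 n).filter fun i =>
        pvIsTransB (PySem.List.pyGetD s (i - 1) 'A') (PySem.List.pyGetD s i 'A')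
      let cuts := 0 :: (bounds ++ [n])
      (cuts.zip cuts.tail).map fun ab => String.mk (PySem.List.slice s (some ab.1) (some ab.2))

-- ===== PRECONDITION & SPEC =====
-- Pre_ excludes only the empty string, on which A raises IndexError (string[0]).
def Pre_camel_case_split2 (string : String) : Prop := string ≠ ""
instance (string : String) : Decidable (Pre_camel_case_split2 string) := by unfold Pre_camel_case_split2; infer_instance
def pvWitness_camel_case_split2 : String := "helloWorld42x"

def Spec_camel_case_split2 (string : String) (out : List String) : Prop := out = camel_case_split2_alt string
instance (string : String) (out : List String) : Decidable (Spec_camel_case_split2 string out) := by unfold Spec_camel_case_split2; infer_instance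

-- ===== CLAIM (what is proved, stated in full; the proofs are below) =====
def Claim_equal_camel_case_split2 : Prop := ∀ (string : String), Dom_camel_case_split2 string → Pre_camel_case_split2 string → Spec_camel_case_split2 string (camel_case_split2 string)

-- ===== LEMMAS AND PROOFS =====

-- the common recursive description of the runs both programs compute
def pvRuns (g : List Char) (p : Char) (cs : List Char) : List (List Char) :=
  match cs with
  | [] => [g]
  | c :: cs' => if pvIsTransA p c then g :: pvRuns [c] c cs' else pvRuns (g ++ [c]) c cs'

lemma pvIsTransB_eq (c1 c2 : Char) : pvIsTransB c1 c2 = pvIsTransA c1 c2 := by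
  unfold pvIsTransA pvIsTransB
  cases PySem.Chars.isdigit c1 <;> simp

-- A's fold over the rest of the string computes pvRuns
lemma foldA_eq (cs : List Char) : ∀ (acc : List (List Char)) (q : List Char) (p : Char),
    cs.foldl pvStepA (acc ++ [q ++ [p]]) = acc ++ pvRuns (q ++ [p]) p cs := by
  induction cs with
  | nil => intro acc q p; simp [pvRuns]
  | cons c cs ih =>
    intro acc q p
    simp only [List.foldl_cons, pvStepA, PySem.List.pyGetD_neg_one_append_singleton, pvRuns]
    by_cases h : pvIsTransA p c = true
    · simp only [h, if_true]
      have := ih (acc ++ [q ++ [p]]) [] c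
      simpa using this
    · simp only [Bool.not_eq_true] at h
      simp only [h, List.dropLast_concat]
      have := ih acc (q ++ [p]) c
      simpa using this

-- slicing the cut list with zip equals the recursive chopper
def pvChop (s : List Char) (a : Nat) (bs : List Nat) (n : Nat) : List (List Char) :=
  match bs with
  | [] => [(s.drop a).take (n - a)]
  | b :: bs' => (s.drop a).take (b - a) :: pvChop s b bs' n

lemma zip_chop (s : List Char) (n : Nat) : ∀ (bs : List Nat) (a : Nat),
    (((a :: (bs ++ [n])).zip (bs ++ [n])).map fun ab => (s.drop ab.1).take (ab.2 - ab.1))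
      = pvChop s a bs n := by
  intro bs
  induction bs with
  | nil => intro a; simp [pvChop]
  | cons b bs ih => intro a; simp only [List.cons_append, List.zip_cons_cons, List.map_cons, pvChop]
                    exact congrArg _ (ih b)

-- chopping at the transition boundaries from position j equals pvRuns
lemma chop_runs (s : List Char) : ∀ (t : List Char) (a j : Nat) (q : List Char) (p : Char),
    t = s.drop j → a ≤ j → j ≤ s.length →
    (s.drop a).take (j - a) = q ++ [p] →
    s.getD (j - 1) 'A' = p →
    pvChop s a ((List.range' j (s.length - j)).filter
        (fun i => pvIsTransA (s.getD (i - 1) 'A') (s.getD i 'A'))) s.length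
      = pvRuns (q ++ [p]) p t := by
  intro t
  induction t with
  | nil =>
    intro a j q p ht haj hj htake hp
    have hj' : s.length ≤ j := by
      have := congrArg List.length ht
      simp at this; omega
    have hjl : j = s.length := le_antisymm hj hj'
    subst hjl
    simp [pvChop, pvRuns, htake]
  | cons c t ih =>
    intro a j q p ht haj hj htake hp
    have hdrop : s.drop j = c :: t := ht.symm
    have hjlt : j < s.length := by
      have := congrArg List.length hdrop
      simp at this; omega
    have hsj : s[j]? = some c := by
      have h0 : (s.drop j)[0]? = some c := by rw [hdrop]; rfl
      rw [List.getElem?_drop] at h0; simpa using h0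
    have hgetj : s.getD j 'A' = c := by
      simp [List.getD, hsj]
    have hrange : List.range' j (s.length - j) = j :: List.range' (j+1) (s.length - (j+1)) := by
      have h1 : s.length - j = (s.length - (j+1)) + 1 := by omega
      rw [h1, List.range'_succ]
    rw [hrange]
    have ht' : t = s.drop (j+1) := by
      have : s.drop (j + 1) = (s.drop j).drop 1 := by
        rw [List.drop_drop]
      rw [this, hdrop]; rfl
    simp only [List.filter_cons, hp, hgetj]
    by_cases htr : pvIsTransA p c = true
    · simp only [htr, if_true]
      simp only [pvChop, htake]
      rw [pvRuns]
      simp only [htr, if_true]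
      refine congrArg _ ?_
      have := ih j (j+1) [] c ht' (by omega) (by omega) ?_ ?_
      · simpa using this
      · simp only [List.nil_append]
        have : (s.drop j).take 1 = [c] := by rw [hdrop]; rfl
        simpa [Nat.add_sub_cancel_left] using this
      · simpa using hgetj
    · simp only [Bool.not_eq_true] at htr
      simp only [htr, decide_false]
      rw [pvRuns]
      simp only [htr]
      have htake' : (s.drop a).take (j + 1 - a) = (q ++ [p]) ++ [c] := by
        have h1 : j + 1 - a = (j - a) + 1 := by omega
        rw [h1, List.take_add_one, htake]
        have : (s.drop a)[j - a]? = s[a + (j - a)]? := List.getElem?_drop ..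
        rw [this, show a + (j - a) = j from by omega, hsj]
        rfl
      have := ih a (j+1) (q ++ [p]) c ht' (by omega) (by omega) htake' (by simpa using hgetj)
      simpa using this

-- pyRange over a Nat-cast upper bound is a mapped Nat range
lemma pyRange_natCast (a n : Nat) : PySem.List.pyRange (a : Int) (n : Int)
    = (List.range' a (n - a)).map (fun k : Nat => (k : Int)) := by
  by_cases h : a < n
  · have h1 : n - a = (n - (a+1)) + 1 := by omega
    rw [PySem.List.pyRange_one_cons (by exact_mod_cast h), h1, List.range'_succ]
    have h2 := pyRange_natCast (a+1) n
    rw [show ((a : Int) + 1) = ((a + 1 : Nat) : Int) from by push_cast; ring, h2]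
    simp
  · rw [List.range'_eq_nil_iff.mpr (by omega)]
    simp only [List.map_nil]
    rw [PySem.List.pyRange_of_pos _ _ (by norm_num : (0:Int) < 1)]
    rw [if_neg (by exact_mod_cast h)]
    simp
termination_by n - a

-- ===== VERDICT (by name: the statement is the Claim_ definition above) =====
theorem camel_case_split2_spec : Claim_equal_camel_case_split2 := by
  intro string _ hpre
  unfold Spec_camel_case_split2
  obtain ⟨c, rest, hs⟩ : ∃ c rest, string.toList = c :: rest := by
    cases h : string.toList with
    | nil => exact absurd (string.toList_eq_nil_iff.mp h) hpre
    | cons c rest => exact ⟨c, rest, rfl⟩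
  simp only [camel_case_split2, camel_case_split2_alt, hs]
  set U := PySem.Chars.upperChar c with hU
  set s := U :: rest with hsdef
  -- left side: A's fold = pvRuns
  have hA : rest.foldl pvStepA [[U]] = pvRuns [U] U rest := by
    have := foldA_eq rest [] [] U
    simpa using this
  rw [hA]
  -- right side: reduce to pvChop at Nat level
  have hlen : PySem.List.len s = (s.length : Int) := by simp [PySem.List.len_eq]
  have hrange : PySem.List.pyRange 1 (PySem.List.len s)
      = (List.range' 1 (s.length - 1)).map (fun k : Nat => (k : Int)) := by
    have h := pyRange_natCast 1 s.length
    rw [Nat.cast_one] at h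
    rw [hlen, h]
  rw [hrange, hlen, List.filter_map]
  set fN : Nat → Bool := fun i => pvIsTransA (s.getD (i - 1) 'A') (s.getD i 'A') with hfN
  have hfilter : List.filter ((fun i => pvIsTransB (PySem.List.pyGetD s (i - 1) 'A')
        (PySem.List.pyGetD s i 'A')) ∘ (fun k : Nat => (k : Int))) (List.range' 1 (s.length - 1))
      = List.filter fN (List.range' 1 (s.length - 1)) := by
    apply List.filter_congr
    intro i hi
    have h1 : 1 ≤ i := by
      have := List.mem_range'.mp hi; omega
    simp only [Function.comp]
    rw [show ((i : Int) - 1) = ((i - 1 : Nat) : Int) from by omega]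
    rw [PySem.List.pyGetD_natCast, PySem.List.pyGetD_natCast, pvIsTransB_eq]
  rw [hfilter]
  set bsN := List.filter fN (List.range' 1 (s.length - 1)) with hbs
  -- cast the cut list through the zip/map
  have hcuts : (0 :: (bsN.map (fun k : Nat => (k : Int)) ++ [(s.length : Int)]))
      = ((0 :: (bsN ++ [s.length])).map (fun k : Nat => (k : Int))) := by
    simp
  rw [hcuts]
  have htailmap : ((0 :: (bsN ++ [s.length])).map (fun k : Nat => (k : Int))).tail
      = ((bsN ++ [s.length]).map (fun k : Nat => (k : Int))) := by
    simp
  rw [htailmap, show ((0 :: (bsN ++ [s.length])).map (fun k : Nat => (k : Int)))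
      = ((0 : Nat) :: (bsN ++ [s.length])).map (fun k : Nat => (k : Int)) from by norm_num,
    List.zip_map, List.map_map]
  have hslice : ∀ ab : Nat × Nat, (String.mk (PySem.List.slice s (some (ab.1 : Int)) (some (ab.2 : Int))))
      = String.mk ((s.drop ab.1).take (ab.2 - ab.1)) := by
    intro ab
    rw [PySem.List.slice_toNat s (by positivity) (by positivity)]
    simp
  have : (((0 :: (bsN ++ [s.length])).zip (bsN ++ [s.length])).map
        ((fun ab : Int × Int => String.mk (PySem.List.slice s (some ab.1) (some ab.2)))
          ∘ Prod.map (fun k : Nat => (k : Int)) (fun k : Nat => (k : Int))))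
      = (((0 :: (bsN ++ [s.length])).zip (bsN ++ [s.length])).map
          (fun ab : Nat × Nat => String.mk ((s.drop ab.1).take (ab.2 - ab.1)))) := by
    apply List.map_congr_left
    intro ab _
    simpa using hslice ab
  rw [this]
  have hmapmk : (((0 :: (bsN ++ [s.length])).zip (bsN ++ [s.length])).map
        (fun ab : Nat × Nat => String.mk ((s.drop ab.1).take (ab.2 - ab.1))))
      = (((0 :: (bsN ++ [s.length])).zip (bsN ++ [s.length])).map
          (fun ab : Nat × Nat => (s.drop ab.1).take (ab.2 - ab.1))).map String.mk := by
    rw [List.map_map]; rfl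
  rw [hmapmk, zip_chop]
  -- chop at the boundaries = pvRuns
  refine congrArg (List.map String.mk) ?_ |>.symm
  have h1 : rest = s.drop 1 := by simp [hsdef]
  have h2 : (1:Nat) ≤ s.length := by simp [hsdef]
  have h3 : (s.drop 0).take (1-0) = [] ++ [U] := by simp [hsdef]
  have h4 : s.getD (1-1) 'A' = U := by simp [hsdef]
  have hmain := chop_runs s rest 0 1 [] U h1 (by omega) h2 h3 h4
  simpa [hbs, hfN] using hmain
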